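-- pv_equiv track=rewrite | github.com/DA-testa/parallel-processing-leonssnoel | main.py | parallel_processing
-- ===== SOURCE A (Python) =====
-- import heapq
--
-- def parallel_processing(n, m, data):
--     output = []
--     threads = [(0, i) for i in range(n)] # (time, thread index)
--     heapq.heapify(threads)
--
--     for job_time in data:
--         time, thread_index = heapq.heappop(threads)
--         output.append((thread_index, time))
--         heapq.heappush(threads, (time + job_time, thread_index))
--
--     return output
-- ===== SOURCE B (Python) =====
-- def parallel_processing(n, m, data):
--     output = []
--     times = [0] * n  # next-available time of each thread
--     for job_time in data:
--         best = 0
--         for i in range(1, n):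
--             if times[i] < times[best]:
--                 best = i
--         output.append((best, times[best]))
--         times[best] += job_time
--     return output
-- ===== Notes on version B (the rewrite author's own statement) =====
-- stated objective: simpler
-- what changed: Replaces the binary min-heap (heapify/heappop/heappush) by a plain array of per-thread next-free times with a linear min-scan (strict < from index 0, so ties go to the lowest index, matching the heap's (time,index) tuple order).
import Mathlib
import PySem

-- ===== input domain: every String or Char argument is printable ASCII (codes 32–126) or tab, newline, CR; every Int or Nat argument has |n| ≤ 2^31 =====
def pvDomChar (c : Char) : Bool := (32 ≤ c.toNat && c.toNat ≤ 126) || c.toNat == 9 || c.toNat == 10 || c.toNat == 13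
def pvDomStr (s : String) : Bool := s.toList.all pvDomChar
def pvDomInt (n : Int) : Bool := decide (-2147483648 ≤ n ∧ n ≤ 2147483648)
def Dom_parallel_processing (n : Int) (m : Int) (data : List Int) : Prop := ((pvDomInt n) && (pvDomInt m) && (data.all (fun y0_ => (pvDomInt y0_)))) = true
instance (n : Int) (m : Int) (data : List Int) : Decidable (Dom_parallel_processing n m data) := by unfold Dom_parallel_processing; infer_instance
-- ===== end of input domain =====

-- B replaces A's binary min-heap by a plain per-thread times array with a linear min-scan
-- (strict < from index 0, so ties go to the lowest index, matching the heap's (time, index) order);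
-- objective: simpler. Equivalence of RETURN values; neither version mutates its arguments.

-- ===== PORT A =====
-- PySem has no heapq, so the heapq calls are ported by hand, step for step, from CPython's
-- pure-Python heapq source (_siftdown, _siftup, heappush, heappop, heapify); the Python list
-- heap is modelled by a Lean Array (O(1) index/assign, like a Python list); exact on every
-- in-range execution (all executions admitted by Pre_ stay in range; on an out-of-range index,
-- where Python would raise, getD/setIfInBounds return a default / do nothing).
-- heap elements are (time, thread_index) pairs; Python tuple '<' on them:
def pvLtB (a b : Int × Int) : Bool := a.1 < b.1 || (a.1 == b.1 && a.2 < b.2)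

-- heap[i] (in-range during every admitted execution)
def gvA (h : Array (Int × Int)) (i : Nat) : Int × Int := h.getD i ((0 : Int), (0 : Int))

-- the while-loop of heapq._siftdown (bubbles newitem up from pos towards startpos;
-- parentpos = (pos-1) >> 1, parent = heap[parentpos] are written inline)
def siftdownGoA (h : Array (Int × Int)) (startpos pos : Nat) (newitem : Int × Int) :
    Array (Int × Int) :=
  if _hgt : startpos < pos then
    if pvLtB newitem (gvA h ((pos - 1) / 2)) then
      siftdownGoA (h.setIfInBounds pos (gvA h ((pos - 1) / 2))) startpos ((pos - 1) / 2) newitem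
    else
      h.setIfInBounds pos newitem
  else
    h.setIfInBounds pos newitem
termination_by pos
decreasing_by omega

-- heapq._siftdown(heap, startpos, pos)
def siftdownA (h : Array (Int × Int)) (startpos pos : Nat) : Array (Int × Int) :=
  siftdownGoA h startpos pos (gvA h pos)

-- the childpos selection inside heapq._siftup's loop (pick the smaller child; Python's
-- 'if rightpos < endpos and not heap[childpos] < heap[rightpos]: childpos = rightpos')
def childSelA (h : Array (Int × Int)) (pos : Nat) : Nat :=
  if 2 * pos + 2 < h.size && !(pvLtB (gvA h (2 * pos + 1)) (gvA h (2 * pos + 2))) then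
    2 * pos + 2
  else
    2 * pos + 1

lemma childSelA_ge (h : Array (Int × Int)) (pos : Nat) : 2 * pos + 1 ≤ childSelA h pos := by
  unfold childSelA; split <;> omega

-- the while-loop of heapq._siftup (moves the hole at pos down to a leaf, promoting smaller children)
def siftupGoA (h : Array (Int × Int)) (pos : Nat) : Array (Int × Int) × Nat :=
  if _hc : 2 * pos + 1 < h.size then
    siftupGoA (h.setIfInBounds pos (gvA h (childSelA h pos))) (childSelA h pos)
  else
    (h, pos)
termination_by h.size - pos
decreasing_by
  simp only [Array.size_setIfInBounds]
  have := childSelA_ge h pos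
  omega

-- heapq._siftup(heap, pos)
def siftupA (h : Array (Int × Int)) (pos : Nat) : Array (Int × Int) :=
  let newitem := gvA h pos
  let r := siftupGoA h pos
  siftdownA (r.1.setIfInBounds r.2 newitem) pos r.2

-- heapq.heappush(heap, item)
def heappushA (h : Array (Int × Int)) (item : Int × Int) : Array (Int × Int) :=
  let n0 := h.size
  siftdownA (h.push item) 0 n0

-- heapq.heappop(heap): returns (popped item, new heap); Pre_ keeps the heap nonempty here
-- (lastelt = heap.pop() is the last element, rest is the popped-down array)
def heappopA (h : Array (Int × Int)) : (Int × Int) × Array (Int × Int) :=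
  let lastelt := gvA h (h.size - 1)
  let rest := h.pop
  if rest.isEmpty then (lastelt, rest)
  else
    let returnitem := gvA rest 0
    (returnitem, siftupA (rest.setIfInBounds 0 lastelt) 0)

-- heapq.heapify(x): for i in reversed(range(n//2)): _siftup(x, i)
def heapifyA (h : Array (Int × Int)) : Array (Int × Int) :=
  ((List.range (h.size / 2)).reverse).foldl (fun x i => siftupA x i) h

def parallel_processing (n : Int) (m : Int) (data : List Int) : List (Int × Int) :=
  let threads := heapifyA (((PySem.List.pyRange 0 n 1).map (fun i => ((0 : Int), i))).toArray)
  (data.foldl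
    (fun (st : List (Int × Int) × Array (Int × Int)) job =>
      let p := heappopA st.2
      (st.1 ++ [(p.1.2, p.1.1)], heappushA p.2 (p.1.1 + job, p.1.2)))
    ([], threads)).1

-- ===== PORT B =====
-- times[i] (in-range during every admitted execution; the Python list is a Lean Array)
def gvIA (times : Array Int) (i : Nat) : Int := times.getD i 0

-- for i in range(1, n): if times[i] < times[best]: best = i   (indices are the Nats 1..n-1)
def scanBestA (times : Array Int) (k : Nat) : Nat :=
  (List.range' 1 k).foldl (fun best i => if gvIA times i < gvIA times best then i else best) 0

def parallel_processing_alt (n : Int) (m : Int) (data : List Int) : List (Int × Int) :=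
  let times0 : Array Int := Array.replicate n.toNat 0
  (data.foldl
    (fun (st : List (Int × Int) × Array Int) job =>
      let best := scanBestA st.2 (n.toNat - 1)
      (st.1 ++ [((best : Int), gvIA st.2 best)], st.2.setIfInBounds best (gvIA st.2 best + job)))
    ([], times0)).1

-- ===== PRECONDITION & SPEC =====
-- Pre_ excludes exactly the inputs where Python A raises IndexError (heappop of an empty heap:
-- n ≤ 0 with a nonempty job list); B raises IndexError there too.
def Pre_parallel_processing (n : Int) (m : Int) (data : List Int) : Prop :=
  data = [] ∨ 1 ≤ n
instance (n : Int) (m : Int) (data : List Int) : Decidable (Pre_parallel_processing n m data) := by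
  unfold Pre_parallel_processing; infer_instance

def pvWitness_parallel_processing : Int × Int × List Int := (3, 0, [2, 1, 4, 1])

def Spec_parallel_processing (n : Int) (m : Int) (data : List Int) (out : List (Int × Int)) : Prop :=
  out = parallel_processing_alt n m data
instance (n : Int) (m : Int) (data : List Int) (out : List (Int × Int)) :
    Decidable (Spec_parallel_processing n m data out) := by
  unfold Spec_parallel_processing; infer_instance

-- ===== CLAIM (what is proved, stated in full; the proofs are below) =====
def Claim_equal_parallel_processing : Prop :=
  ∀ (n : Int) (m : Int) (data : List Int), Dom_parallel_processing n m data →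
    Pre_parallel_processing n m data →
    Spec_parallel_processing n m data (parallel_processing n m data)


-- ===== LEMMAS AND PROOFS =====

-- heap[i] (in-range during every admitted execution)
-- list-level ghost of the ports, used only by the proofs (the ports compute the same
-- values on Arrays; the toList simulation lemmas below connect the two)
def gv (h : List (Int × Int)) (i : Nat) : Int × Int := h.getD i ((0 : Int), (0 : Int))

-- the while-loop of heapq._siftdown (bubbles newitem up from pos towards startpos;
-- parentpos = (pos-1) >> 1, parent = heap[parentpos] are written inline)
def siftdownGo (h : List (Int × Int)) (startpos pos : Nat) (newitem : Int × Int) :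
    List (Int × Int) :=
  if _hgt : startpos < pos then
    if pvLtB newitem (gv h ((pos - 1) / 2)) then
      siftdownGo (h.set pos (gv h ((pos - 1) / 2))) startpos ((pos - 1) / 2) newitem
    else
      h.set pos newitem
  else
    h.set pos newitem
termination_by pos
decreasing_by omega

-- heapq._siftdown(heap, startpos, pos)
def siftdown (h : List (Int × Int)) (startpos pos : Nat) : List (Int × Int) :=
  siftdownGo h startpos pos (gv h pos)

-- the childpos selection inside heapq._siftup's loop (pick the smaller child; Python's
-- 'if rightpos < endpos and not heap[childpos] < heap[rightpos]: childpos = rightpos')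
def childSel (h : List (Int × Int)) (pos : Nat) : Nat :=
  if 2 * pos + 2 < h.length && !(pvLtB (gv h (2 * pos + 1)) (gv h (2 * pos + 2))) then
    2 * pos + 2
  else
    2 * pos + 1

lemma childSel_ge (h : List (Int × Int)) (pos : Nat) : 2 * pos + 1 ≤ childSel h pos := by
  unfold childSel; split <;> omega

-- the while-loop of heapq._siftup (moves the hole at pos down to a leaf, promoting smaller children)
def siftupGo (h : List (Int × Int)) (pos : Nat) : List (Int × Int) × Nat :=
  if _hc : 2 * pos + 1 < h.length then
    siftupGo (h.set pos (gv h (childSel h pos))) (childSel h pos)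
  else
    (h, pos)
termination_by h.length - pos
decreasing_by
  simp only [List.length_set]
  have := childSel_ge h pos
  omega

-- heapq._siftup(heap, pos)
def siftup (h : List (Int × Int)) (pos : Nat) : List (Int × Int) :=
  siftdown ((siftupGo h pos).1.set (siftupGo h pos).2 (gv h pos)) pos (siftupGo h pos).2

-- heapq.heappush(heap, item)
def heappush (h : List (Int × Int)) (item : Int × Int) : List (Int × Int) :=
  siftdown (h ++ [item]) 0 h.length

-- heapq.heappop(heap): returns (popped item, new heap); Pre_ keeps the heap nonempty here
-- (lastelt = heap.pop() is h.getLastD, rest is the popped-down list h.dropLast, written inline)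
def heappop (h : List (Int × Int)) : (Int × Int) × List (Int × Int) :=
  if h.dropLast.isEmpty then (h.getLastD ((0 : Int), (0 : Int)), h.dropLast)
  else (gv h.dropLast 0, siftup (h.dropLast.set 0 (h.getLastD ((0 : Int), (0 : Int)))) 0)

-- heapq.heapify(x): for i in reversed(range(n//2)): _siftup(x, i)
def heapify (h : List (Int × Int)) : List (Int × Int) :=
  ((List.range (h.length / 2)).reverse).foldl (fun x i => siftup x i) h

-- times[i] (in-range during every admitted execution)
def gvI (times : List Int) (i : Nat) : Int := times.getD i 0

-- for i in range(1, n): if times[i] < times[best]: best = i   (indices are the Nats 1..n-1)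
def scanBest (times : List Int) (k : Nat) : Nat :=
  (List.range' 1 k).foldl (fun best i => if gvI times i < gvI times best then i else best) 0


-- ---- order facts about the Python tuple comparison ----
lemma pvLt_irrefl (a : Int × Int) : pvLtB a a = false := by
  simp [pvLtB]

lemma pvLt_asymm {a b : Int × Int} (h : pvLtB a b = true) : pvLtB b a = false := by
  obtain ⟨a1, a2⟩ := a; obtain ⟨b1, b2⟩ := b
  simp [pvLtB] at *; omega

lemma pvLe_trans {a b c : Int × Int} (hab : pvLtB b a = false) (hbc : pvLtB c b = false) :
    pvLtB c a = false := by
  obtain ⟨a1, a2⟩ := a; obtain ⟨b1, b2⟩ := b; obtain ⟨c1, c2⟩ := c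
  simp [pvLtB] at *; omega

lemma pvLt_le_trans {a b c : Int × Int} (hab : pvLtB a b = true) (hbc : pvLtB c b = false) :
    pvLtB c a = false := by
  obtain ⟨a1, a2⟩ := a; obtain ⟨b1, b2⟩ := b; obtain ⟨c1, c2⟩ := c
  simp [pvLtB] at *; omega

lemma pvLe_connex {a b : Int × Int} (h1 : pvLtB a b = false) (h2 : pvLtB b a = false) : a = b := by
  obtain ⟨a1, a2⟩ := a; obtain ⟨b1, b2⟩ := b
  simp [pvLtB] at h1 h2
  simp only [Prod.mk.injEq]
  omega

-- ---- gv (list access with default) facts ----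
lemma gv_eq_getElem {h : List (Int × Int)} {i : Nat} (hi : i < h.length) : gv h i = h[i] := by
  simp [gv, List.getD_eq_getElem?_getD, List.getElem?_eq_getElem hi]

lemma gv_set_self {h : List (Int × Int)} {i : Nat} (hi : i < h.length) (x : Int × Int) :
    gv (h.set i x) i = x := by
  rw [gv_eq_getElem (by simpa using hi)]
  simp [List.getElem_set_self]

lemma gv_set_ne {h : List (Int × Int)} {i j : Nat} (hij : j ≠ i) (x : Int × Int) :
    gv (h.set i x) j = gv h j := by
  have hne : i ≠ j := fun hc => hij hc.symm
  simp [gv, List.getD_eq_getElem?_getD, List.getElem?_set_ne hne]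

lemma set_gv_self {h : List (Int × Int)} {i : Nat} (hi : i < h.length) :
    h.set i (gv h i) = h := by
  rw [gv_eq_getElem hi, List.set_getElem_self]

lemma gv_cons_zero (a : Int × Int) (t : List (Int × Int)) : gv (a :: t) 0 = a := rfl

lemma gv_cons_succ (a : Int × Int) (t : List (Int × Int)) (i : Nat) :
    gv (a :: t) (i + 1) = gv t i := rfl

lemma gv_append_lt {h t : List (Int × Int)} {i : Nat} (hi : i < h.length) :
    gv (h ++ t) i = gv h i := by
  simp [gv, List.getD_eq_getElem?_getD, List.getElem?_append_left hi]

lemma gv_append_last (h : List (Int × Int)) (x : Int × Int) :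
    gv (h ++ [x]) h.length = x := by
  rw [gv_eq_getElem (by simp)]
  simp

lemma gv_dropLast {h : List (Int × Int)} {i : Nat} (hi : i < h.length - 1) :
    gv h.dropLast i = gv h i := by
  rw [gv_eq_getElem (by simpa using hi), gv_eq_getElem (by omega)]
  simp [List.getElem_dropLast]

-- swapping the contents of two positions is a permutation
lemma swap_perm : ∀ (l : List (Int × Int)) (i j : Nat), i < j → j < l.length →
    ((l.set i (gv l j)).set j (gv l i)).Perm l := by
  intro l
  induction l with
  | nil => intro i j _ hj; simp at hj
  | cons a t ih =>
    intro i j hij hj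
    match j, hij with
    | j' + 1, _ =>
      match i with
      | 0 =>
        have hj' : j' < t.length := by simpa using hj
        simp only [List.set_cons_zero, List.set_cons_succ, gv_cons_zero, gv_cons_succ]
        have p1 : (gv t j' :: t.set j' a).Perm (gv t j' :: (a :: t.eraseIdx j')) :=
          List.Perm.cons _ (List.set_perm_cons_eraseIdx hj' a)
        have p2 : (gv t j' :: (a :: t.eraseIdx j')).Perm (a :: (gv t j' :: t.eraseIdx j')) :=
          List.Perm.swap _ _ _
        have p3 : (a :: (gv t j' :: t.eraseIdx j')).Perm (a :: t) := by
          apply List.Perm.cons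
          rw [gv_eq_getElem hj']
          exact List.getElem_cons_eraseIdx_perm hj'
        exact (p1.trans p2).trans p3
      | i' + 1 =>
        simp only [List.set_cons_succ, gv_cons_succ]
        exact List.Perm.cons a (ih i' j' (by omega) (by simpa using hj))

lemma set_set_swap_perm {l : List (Int × Int)} {i j : Nat} (hne : i ≠ j)
    (hi : i < l.length) (hj : j < l.length) :
    ((l.set i (gv l j)).set j (gv l i)).Perm l := by
  rcases Nat.lt_or_ge i j with h | h
  · exact swap_perm l i j h hj
  · have hji : j < i := by omega
    have hp := swap_perm l j i hji hi
    have he : (l.set i (gv l j)).set j (gv l i) = (l.set j (gv l i)).set i (gv l j) :=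
      List.set_comm _ _ (by omega)
    rw [he]
    exact hp

-- ---- the subtree relation on heap indices ----
def subQ (s q : Nat) : Bool :=
  if q = s then true
  else if q < s then false
  else subQ s ((q - 1) / 2)
termination_by q
decreasing_by omega

lemma subQ_self (s : Nat) : subQ s s = true := by rw [subQ]; simp

lemma subQ_zero : ∀ q, subQ 0 q = true := by
  intro q
  induction q using Nat.strong_induction_on with
  | _ q ih =>
    rw [subQ]
    rcases Nat.eq_zero_or_pos q with h | h
    · simp [h]
    · simp only [if_neg (by omega : ¬ q = 0), if_neg (by omega : ¬ q < 0)]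
      exact ih _ (by omega)

lemma subQ_le : ∀ q s, subQ s q = true → s ≤ q := by
  intro q
  induction q using Nat.strong_induction_on with
  | _ q ih =>
    intro s h
    rw [subQ] at h
    by_cases h1 : q = s
    · omega
    · by_cases h2 : q < s
      · simp [h1, h2] at h
      · omega

lemma subQ_parent {s q : Nat} (h : subQ s q = true) (hne : q ≠ s) : subQ s ((q - 1) / 2) = true := by
  rw [subQ] at h
  by_cases h2 : q < s
  · simp [hne, h2] at h
  · simpa [hne, h2] using h

lemma subQ_of_parent {s q : Nat} (hq : 1 ≤ q) (h : subQ s ((q - 1) / 2) = true) :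
    subQ s q = true := by
  have hps : s ≤ (q - 1) / 2 := subQ_le _ _ h
  have : ¬ q = s := by omega
  have : ¬ q < s := by omega
  rw [subQ]
  simp_all

lemma subQ_trans : ∀ q s s', subQ s q = true → subQ s' s = true → subQ s' q = true := by
  intro q
  induction q using Nat.strong_induction_on with
  | _ q ih =>
    intro s s' h1 h2
    by_cases hqs : q = s
    · subst hqs; exact h2
    · have hp := subQ_parent h1 hqs
      have hq1 : 1 ≤ q := by have := subQ_le q s h1; omega
      exact subQ_of_parent hq1 (ih _ (by omega) s s' hp h2)

lemma subQ_chain : ∀ r i j, subQ i r = true → subQ j r = true → i ≤ j → subQ i j = true := by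
  intro r
  induction r using Nat.strong_induction_on with
  | _ r ih =>
    intro i j h1 h2 hij
    by_cases hrj : r = j
    · subst hrj; exact h1
    · by_cases hri : r = i
      · have := subQ_le r i h1; have := subQ_le r j h2; omega
      · have hr1 : 1 ≤ r := by have := subQ_le r i h1; have := subQ_le r j h2; omega
        exact ih _ (by omega) i j (subQ_parent h1 hri) (subQ_parent h2 hrj) hij

lemma subQ_child_lb {j b : Nat} (h : subQ j b = true) (hne : b ≠ j) : 2 * j + 1 ≤ b := by
  have hb : j ≤ b := subQ_le _ _ h
  have hb1 : 1 ≤ b := by omega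
  have hp := subQ_parent h hne
  have := subQ_le _ _ hp
  omega

-- ---- the heap-order predicate on the subtree rooted at s ----
def HSat (v : List (Int × Int)) (s : Nat) : Prop :=
  ∀ b : Nat, b < v.length → subQ s b = true → b ≠ s →
    pvLtB (gv v b) (gv v ((b - 1) / 2)) = false

lemma HSat_leaf {v : List (Int × Int)} {j : Nat} (h : v.length ≤ 2 * j + 1) : HSat v j := by
  intro b hb hsub hne
  have := subQ_child_lb hsub hne
  omega

lemma HSat_sub {v : List (Int × Int)} {p q : Nat} (h : HSat v p) (hq : subQ p q = true) :
    HSat v q := by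
  intro b hb hsub hne
  have hbp : subQ p b = true := subQ_trans b q p hsub hq
  have hqb : q ≤ b := subQ_le _ _ hsub
  have hpq : p ≤ q := subQ_le _ _ hq
  by_cases hbps : b = p
  · have : q = p := by omega
    exact absurd (hbps.trans this.symm) hne
  · exact h b hb hbp hbps

lemma HSat_congr {v v' : List (Int × Int)} {j : Nat} (hlen : v'.length = v.length)
    (hsame : ∀ r, subQ j r = true → gv v' r = gv v r) (h : HSat v j) : HSat v' j := by
  intro b hb hsub hne
  have hb' : b < v.length := by omega
  have h1 := hsame b hsub
  have h2 := hsame ((b - 1) / 2) (subQ_parent hsub hne)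
  rw [h1, h2]
  exact h b hb' hsub hne

-- the root of a heap is a minimum
lemma root_min {v : List (Int × Int)} (hv : HSat v 0) :
    ∀ k, k < v.length → pvLtB (gv v k) (gv v 0) = false := by
  intro k
  induction k using Nat.strong_induction_on with
  | _ k ih =>
    intro hk
    rcases Nat.eq_zero_or_pos k with h0 | h0
    · subst h0; exact pvLt_irrefl _
    · have hpar : (k - 1) / 2 < k := by omega
      have h1 := ih _ hpar (by omega)
      have h2 := hv k hk (subQ_zero k) (by omega)
      exact pvLe_trans h1 h2

lemma root_min_mem {v : List (Int × Int)} (hv : HSat v 0) {e : Int × Int} (he : e ∈ v) :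
    pvLtB e (gv v 0) = false := by
  obtain ⟨k, hk, rfl⟩ := List.getElem_of_mem he
  rw [← gv_eq_getElem hk]
  exact root_min hv k hk

-- ---- correctness of the bubble-up loop (heapq._siftdown) ----
lemma siftdownGo_spec (x : Int × Int) (s : Nat) :
    ∀ pos (h : List (Int × Int)), pos < h.length → subQ s pos = true →
    (∀ b, b < h.length → subQ s b = true → b ≠ s → b ≠ pos →
        pvLtB (gv (h.set pos x) b) (gv (h.set pos x) ((b - 1) / 2)) = false) →
    (pos ≠ s → ∀ b, b < h.length → (b = 2 * pos + 1 ∨ b = 2 * pos + 2) →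
        pvLtB (gv (h.set pos x) b) (gv (h.set pos x) ((pos - 1) / 2)) = false) →
    (siftdownGo h s pos x).length = h.length ∧
    (siftdownGo h s pos x).Perm (h.set pos x) ∧
    HSat (siftdownGo h s pos x) s ∧
    (∀ r, subQ s r = false → gv (siftdownGo h s pos x) r = gv h r) := by
  intro pos
  induction pos using Nat.strong_induction_on with
  | _ pos ih =>
    intro h hlen hsub hA hB
    have hspos : s ≤ pos := subQ_le _ _ hsub
    rw [siftdownGo]
    by_cases hgt : s < pos
    · have hpos1 : 1 ≤ pos := by omega
      have hppne : (pos - 1) / 2 ≠ pos := by omega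
      have hpplt : (pos - 1) / 2 < pos := by omega
      -- value table for v := h.set pos x
      have hv : ∀ r, r ≠ pos → gv (h.set pos x) r = gv h r := fun r hr => gv_set_ne hr x
      have hvpos : gv (h.set pos x) pos = x := gv_set_self hlen x
      by_cases hx : pvLtB x (gv h ((pos - 1) / 2)) = true
      · simp only [dif_pos hgt, if_pos hx]
        set pp := (pos - 1) / 2 with hppdef
        have hsubpp : subQ s pp = true := subQ_parent hsub (by omega)
        have hpplen : pp < (h.set pos (gv h pp)).length := by
          simp only [List.length_set]; omega
        -- value table for v' := (h.set pos (gv h pp)).set pp x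
        have hv'pp : gv ((h.set pos (gv h pp)).set pp x) pp = x :=
          gv_set_self hpplen x
        have hv'pos : gv ((h.set pos (gv h pp)).set pp x) pos = gv h pp := by
          rw [gv_set_ne (by omega) x, gv_set_self hlen _]
        have hv' : ∀ r, r ≠ pos → r ≠ pp → gv ((h.set pos (gv h pp)).set pp x) r = gv h r := by
          intro r h1 h2
          rw [gv_set_ne h2 x, gv_set_ne h1 _]
        have hA' : ∀ b, b < (h.set pos (gv h pp)).length → subQ s b = true → b ≠ s → b ≠ pp →
            pvLtB (gv ((h.set pos (gv h pp)).set pp x) b)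
              (gv ((h.set pos (gv h pp)).set pp x) ((b - 1) / 2)) = false := by
          intro b hb hsb hbs hbpp
          have hb' : b < h.length := by simpa using hb
          by_cases hbpos : b = pos
          · rw [hbpos, hv'pos]
            have hbp2 : (pos - 1) / 2 = pp := hppdef.symm
            rw [hbp2, hv'pp]
            exact pvLt_asymm hx
          · by_cases hparpos : (b - 1) / 2 = pos
            · -- b is a child of pos
              have hb1 : 2 * pos + 1 ≤ b := by omega
              have hbchild : b = 2 * pos + 1 ∨ b = 2 * pos + 2 := by omega
              have := hB (by omega) b hb' hbchild
              rw [hv b hbpos, hv pp hppne] at this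
              rw [hv' b hbpos hbpp, hparpos, hv'pos]
              exact this
            · by_cases hparpp : (b - 1) / 2 = pp
              · -- b is a sibling child of pp
                have hb1 : 2 * pp + 1 ≤ b := by
                  have : 1 ≤ b := by
                    rcases Nat.eq_zero_or_pos b with h0 | h0
                    · exfalso; apply hbs; have := subQ_le b s hsb; omega
                    · omega
                  omega
                have hle := hA b hb' hsb hbs hbpos
                rw [hv b hbpos, hparpp, hv pp hppne] at hle
                rw [hv' b hbpos hbpp, hparpp, hv'pp]
                exact pvLt_le_trans hx hle
              · have hle := hA b hb' hsb hbs hbpos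
                rw [hv b hbpos, hv _ hparpos] at hle
                rw [hv' b hbpos hbpp, hv' _ hparpos hparpp]
                exact hle
        have hB' : pp ≠ s → ∀ b, b < (h.set pos (gv h pp)).length →
            (b = 2 * pp + 1 ∨ b = 2 * pp + 2) →
            pvLtB (gv ((h.set pos (gv h pp)).set pp x) b)
              (gv ((h.set pos (gv h pp)).set pp x) ((pp - 1) / 2)) = false := by
          intro hpps b hb hbchild
          have hb' : b < h.length := by simpa using hb
          have hgp1 : (pp - 1) / 2 ≠ pos := by omega
          have hgp2 : (pp - 1) / 2 ≠ pp := by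
            have := subQ_le _ _ hsubpp
            omega
          have hpple : pvLtB (gv h pp) (gv h ((pp - 1) / 2)) = false := by
            have := hA pp (by omega) hsubpp hpps hppne
            rwa [hv pp hppne, hv _ hgp1] at this
          by_cases hbpos : b = pos
          · rw [hbpos, hv'pos, hv' _ hgp1 hgp2]
            exact hpple
          · have hbpp : b ≠ pp := by omega
            have hsb : subQ s b = true := by
              apply subQ_of_parent (by omega)
              have : (b - 1) / 2 = pp := by omega
              rw [this]; exact hsubpp
            have hbs : b ≠ s := by
              have := subQ_le _ _ hsubpp
              omega
            have hle := hA b hb' hsb hbs hbpos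
            have hparb : (b - 1) / 2 = pp := by omega
            rw [hv b hbpos, hparb, hv pp hppne] at hle
            rw [hv' b hbpos hbpp, hv' _ hgp1 hgp2]
            exact pvLe_trans hpple hle
        obtain ⟨L, P, H, U⟩ := ih pp hpplt (h.set pos (gv h pp)) hpplen hsubpp hA' hB'
        have hperm : ((h.set pos (gv h pp)).set pp x).Perm (h.set pos x) := by
          have he1 : (h.set pos x).set pos (gv (h.set pos x) pp) = h.set pos (gv h pp) := by
            rw [hv pp hppne, List.set_set]
          have he2 : gv (h.set pos x) pos = x := hvpos
          have := set_set_swap_perm (l := h.set pos x) (i := pos) (j := pp)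
            (by omega) (by simpa using hlen) (by simp only [List.length_set]; omega)
          rw [he1, he2] at this
          exact this
        refine ⟨by simpa using L, P.trans hperm, H, ?_⟩
        intro r hr
        have hrpos : r ≠ pos := by
          intro hc; rw [hc, hsub] at hr; simp at hr
        rw [U r hr, gv_set_ne hrpos]
      · have hxf : pvLtB x (gv h ((pos - 1) / 2)) = false := by
          simpa using hx
        simp only [dif_pos hgt, if_neg hx]
        refine ⟨by simp, List.Perm.refl _, ?_, ?_⟩
        · intro b hb hsb hbs
          have hb' : b < h.length := by simpa using hb
          by_cases hbpos : b = pos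
          · subst hbpos
            rw [hvpos, hv _ hppne]
            exact hxf
          · exact hA b hb' hsb hbs hbpos
        · intro r hr
          have hrpos : r ≠ pos := by
            intro hc; rw [hc, hsub] at hr; simp at hr
          exact gv_set_ne hrpos x
    · have hps : pos = s := by omega
      simp only [dif_neg hgt]
      refine ⟨by simp, List.Perm.refl _, ?_, ?_⟩
      · intro b hb hsb hbs
        have hb' : b < h.length := by simpa using hb
        have hbpos : b ≠ pos := by omega
        exact hA b hb' hsb hbs hbpos
      · intro r hr
        have hrpos : r ≠ pos := by
          intro hc; rw [hc, hsub] at hr; simp at hr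
        exact gv_set_ne hrpos x

-- ---- correctness of the hole-walk loop (heapq._siftup) ----
lemma siftupGo_spec (x : Int × Int) (s : Nat) :
    ∀ (k : Nat) (h : List (Int × Int)) (pos : Nat), h.length - pos = k →
    pos < h.length → subQ s pos = true →
    (∀ b, b < h.length → subQ s b = true → b ≠ s → b ≠ pos → (b - 1) / 2 ≠ pos →
        pvLtB (gv (h.set pos x) b) (gv (h.set pos x) ((b - 1) / 2)) = false) →
    (pos ≠ s → ∀ b, b < h.length → (b = 2 * pos + 1 ∨ b = 2 * pos + 2) →
        pvLtB (gv (h.set pos x) b) (gv (h.set pos x) ((pos - 1) / 2)) = false) →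
    (siftupGo h pos).1.length = h.length ∧
    (siftupGo h pos).2 < h.length ∧ subQ s (siftupGo h pos).2 = true ∧
    h.length ≤ 2 * (siftupGo h pos).2 + 1 ∧
    ((siftupGo h pos).1.set (siftupGo h pos).2 x).Perm (h.set pos x) ∧
    (∀ b, b < h.length → subQ s b = true → b ≠ s → b ≠ (siftupGo h pos).2 →
        pvLtB (gv ((siftupGo h pos).1.set (siftupGo h pos).2 x) b)
          (gv ((siftupGo h pos).1.set (siftupGo h pos).2 x) ((b - 1) / 2)) = false) ∧
    (∀ r, subQ s r = false → gv (siftupGo h pos).1 r = gv h r) := by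
  intro k
  induction k using Nat.strong_induction_on with
  | _ k ih =>
    intro h pos hk hlen hsub hA hB
    have hspos : s ≤ pos := subQ_le _ _ hsub
    rw [siftupGo]
    by_cases hc : 2 * pos + 1 < h.length
    · simp only [dif_pos hc]
      set c := childSel h pos with hcdef
      have hcge : 2 * pos + 1 ≤ c := childSel_ge h pos
      have hcc : (c = 2 * pos + 1 ∧ (2 * pos + 2 < h.length →
            pvLtB (gv h (2 * pos + 1)) (gv h (2 * pos + 2)) = true)) ∨
          (c = 2 * pos + 2 ∧ 2 * pos + 2 < h.length ∧
            pvLtB (gv h (2 * pos + 1)) (gv h (2 * pos + 2)) = false) := by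
        rw [hcdef]
        unfold childSel
        by_cases hcond : (2 * pos + 2 < h.length ∧
            pvLtB (gv h (2 * pos + 1)) (gv h (2 * pos + 2)) = false)
        · rw [if_pos (by simp [hcond.1, hcond.2])]
          right
          exact ⟨rfl, hcond.1, hcond.2⟩
        · rw [if_neg (by
            simp only [Bool.and_eq_true, Bool.not_eq_true', decide_eq_true_eq]
            exact hcond)]
          left
          refine ⟨rfl, fun h2 => ?_⟩
          rcases Bool.eq_false_or_eq_true (pvLtB (gv h (2 * pos + 1)) (gv h (2 * pos + 2)))
            with ht | hf
          · exact ht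
          · exact absurd ⟨h2, hf⟩ hcond
      have hclt : c < h.length := by rcases hcc with ⟨h1, _⟩ | ⟨h1, h2, _⟩ <;> omega
      have hcpos : pos < c := by omega
      have hparc : (c - 1) / 2 = pos := by rcases hcc with ⟨h1, _⟩ | ⟨h1, _, _⟩ <;> omega
      have hcmin : ∀ d, d < h.length → (d = 2 * pos + 1 ∨ d = 2 * pos + 2) → d ≠ c →
          pvLtB (gv h d) (gv h c) = false := by
        intro d hd hdc hdnec
        rcases hcc with ⟨h1, himp⟩ | ⟨h1, h2, h3⟩
        · have hd2 : d = 2 * pos + 2 := by omega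
          rw [hd2, h1]
          exact pvLt_asymm (himp (by omega))
        · have hd2 : d = 2 * pos + 1 := by omega
          rw [hd2, h1]
          exact h3
      have hsubc : subQ s c = true := by
        apply subQ_of_parent (by omega)
        rw [hparc]; exact hsub
      -- v' := (h.set pos (gv h c)).set c x ; v := h.set pos x
      have hv : ∀ r, r ≠ pos → gv (h.set pos x) r = gv h r := fun r hr => gv_set_ne hr x
      have hvpos : gv (h.set pos x) pos = x := gv_set_self hlen x
      have hclen' : c < (h.set pos (gv h c)).length := by
        simp only [List.length_set]; omega
      have hv'c : gv ((h.set pos (gv h c)).set c x) c = x := gv_set_self hclen' x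
      have hv'pos : gv ((h.set pos (gv h c)).set c x) pos = gv h c := by
        rw [gv_set_ne (by omega) x, gv_set_self hlen _]
      have hv' : ∀ r, r ≠ pos → r ≠ c → gv ((h.set pos (gv h c)).set c x) r = gv h r := by
        intro r h1 h2
        rw [gv_set_ne h2 x, gv_set_ne h1 _]
      have hA' : ∀ b, b < (h.set pos (gv h c)).length → subQ s b = true → b ≠ s → b ≠ c →
          (b - 1) / 2 ≠ c →
          pvLtB (gv ((h.set pos (gv h c)).set c x) b)
            (gv ((h.set pos (gv h c)).set c x) ((b - 1) / 2)) = false := by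
        intro b hb hsb hbs hbc hpbc
        have hb' : b < h.length := by simpa using hb
        by_cases hbpos : b = pos
        · -- the pair (parent pos, pos): use the grandparent bound hB
          have hposs : pos ≠ s := by omega
          have hgp : (pos - 1) / 2 ≠ pos := by omega
          have hgpc : (pos - 1) / 2 ≠ c := by omega
          have hthis := hB hposs c hclt (by omega)
          rw [hv c (by omega), hv _ hgp] at hthis
          rw [hbpos, hv'pos, hv' _ hgp hgpc]
          exact hthis
        · by_cases hparpos : (b - 1) / 2 = pos
          · -- b is a sibling child of pos (b ≠ c)
            have hbchild : b = 2 * pos + 1 ∨ b = 2 * pos + 2 := by omega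
            have := hcmin b hb' hbchild hbc
            rw [hv' b hbpos hbc, hparpos, hv'pos]
            exact this
          · have := hA b hb' hsb hbs hbpos hparpos
            rw [hv b hbpos, hv _ hparpos] at this
            rw [hv' b hbpos hbc, hv' _ hparpos hpbc]
            exact this
      have hB' : c ≠ s → ∀ b, b < (h.set pos (gv h c)).length →
          (b = 2 * c + 1 ∨ b = 2 * c + 2) →
          pvLtB (gv ((h.set pos (gv h c)).set c x) b)
            (gv ((h.set pos (gv h c)).set c x) ((c - 1) / 2)) = false := by
        intro _ b hb hbchild
        have hb' : b < h.length := by simpa using hb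
        have hbc : b ≠ c := by omega
        have hbpos : b ≠ pos := by omega
        have hsb : subQ s b = true := by
          apply subQ_of_parent (by omega)
          have : (b - 1) / 2 = c := by omega
          rw [this]; exact hsubc
        have hbs : b ≠ s := by omega
        have hparb : (b - 1) / 2 = c := by omega
        have := hA b hb' hsb hbs hbpos (by omega)
        rw [hv b hbpos, hparb, hv c (by omega)] at this
        rw [hv' b hbpos hbc, hparc, hv'pos]
        exact this
      have hklt : (h.set pos (gv h c)).length - c < k := by
        simp only [List.length_set]; omega
      obtain ⟨L, P2, SB, LF, PM, AC, U⟩ := ih _ hklt (h.set pos (gv h c)) c rfl hclen' hsubc hA' hB'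
      have hperm : ((h.set pos (gv h c)).set c x).Perm (h.set pos x) := by
        have he1 : (h.set pos x).set pos (gv (h.set pos x) c) = h.set pos (gv h c) := by
          rw [hv c (by omega), List.set_set]
        have := set_set_swap_perm (l := h.set pos x) (i := pos) (j := c)
          (by omega) (by simpa using hlen) (by simp only [List.length_set]; omega)
        rw [he1, hvpos] at this
        exact this
      have hLs : (h.set pos (gv h c)).length = h.length := by simp
      rw [hLs] at P2 LF
      refine ⟨by rw [L, hLs], P2, SB, LF, PM.trans hperm, ?_, ?_⟩
      · intro b hb hsb hbs hbne
        exact AC b (by simpa [hLs] using hb) hsb hbs hbne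
      · intro r hr
        have hrpos : r ≠ pos := by
          intro hcq; rw [hcq, hsub] at hr; simp at hr
        rw [U r hr, gv_set_ne hrpos]
    · rw [dif_neg hc]
      refine ⟨rfl, hlen, hsub, by omega, List.Perm.refl _, ?_, fun r _ => rfl⟩
      intro b hb hsb hbs hbpos
      have hpb : (b - 1) / 2 ≠ pos := by
        intro hcq
        have : 1 ≤ b := by
          have := subQ_le b s hsb; omega
        omega
      exact hA b hb hsb hbs hbpos hpb

lemma siftup_spec (h : List (Int × Int)) (s : Nat) (hlen : s < h.length)
    (hA : ∀ b, b < h.length → subQ s b = true → b ≠ s → (b - 1) / 2 ≠ s →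
        pvLtB (gv h b) (gv h ((b - 1) / 2)) = false) :
    (siftup h s).length = h.length ∧ (siftup h s).Perm h ∧ HSat (siftup h s) s ∧
    (∀ r, subQ s r = false → gv (siftup h s) r = gv h r) := by
  have hset : h.set s (gv h s) = h := set_gv_self hlen
  obtain ⟨L, P2, SB, LF, PM, AC, U⟩ :=
    siftupGo_spec (gv h s) s (h.length - s) h s rfl hlen (subQ_self s)
      (by intro b hb hsb hbs hbpos hpb; rw [hset]; exact hA b hb hsb hbs hpb)
      (by intro hss; exact absurd rfl hss)
  rw [hset] at PM
  set r1 := (siftupGo h s).1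
  set p1 := (siftupGo h s).2
  have hXlen : (r1.set p1 (gv h s)).length = h.length := by
    simp only [List.length_set]; exact L
  have hp1X : p1 < (r1.set p1 (gv h s)).length := by omega
  have hp1r : p1 < r1.length := by omega
  have hgvX : gv (r1.set p1 (gv h s)) p1 = gv h s := gv_set_self hp1r _
  have hXset : (r1.set p1 (gv h s)).set p1 (gv h s) = r1.set p1 (gv h s) := List.set_set ..
  unfold siftup siftdown
  rw [hgvX]
  obtain ⟨L2, P3, H3, U3⟩ :=
    siftdownGo_spec (gv h s) s p1 (r1.set p1 (gv h s)) hp1X SB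
      (by intro b hb hsb hbs hbp1; rw [hXset]; exact AC b (by omega) hsb hbs hbp1)
      (by intro _ b hb hbc
          exfalso
          rw [hXlen] at hb
          omega)
  rw [hXset] at P3
  refine ⟨by rw [L2, hXlen], P3.trans (PM.trans (List.Perm.refl h)), H3, ?_⟩
  intro r hr
  have hrp1 : r ≠ p1 := by
    intro hc; rw [hc, SB] at hr; simp at hr
  rw [U3 r hr, gv_set_ne hrp1, U r hr]

lemma heapify_fold : ∀ (k : Nat) (x : List (Int × Int)), k ≤ x.length →
    (∀ j, k ≤ j → HSat x j) →
    (((List.range k).reverse).foldl (fun y i => siftup y i) x).length = x.length ∧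
    (((List.range k).reverse).foldl (fun y i => siftup y i) x).Perm x ∧
    HSat (((List.range k).reverse).foldl (fun y i => siftup y i) x) 0 := by
  intro k
  induction k with
  | zero =>
    intro x _ hall
    exact ⟨rfl, List.Perm.refl _, hall 0 (Nat.le_refl 0)⟩
  | succ k ihk =>
    intro x hk hall
    rw [List.range_succ, List.reverse_append, List.reverse_singleton, List.singleton_append,
      List.foldl_cons]
    have hklt : k < x.length := by omega
    have hA : ∀ b, b < x.length → subQ k b = true → b ≠ k → (b - 1) / 2 ≠ k →
        pvLtB (gv x b) (gv x ((b - 1) / 2)) = false := by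
      intro b hb hsb hbk hpbk
      have hp := subQ_parent hsb hbk
      have hple : k ≤ (b - 1) / 2 := subQ_le _ _ hp
      have hb1 : 1 ≤ b := by
        have := subQ_le b k hsb; omega
      have := hall ((b - 1) / 2) (by omega) b hb
        (subQ_of_parent hb1 (subQ_self _)) (by omega)
      exact this
    obtain ⟨L, P, H, U⟩ := siftup_spec x k hklt hA
    have hall' : ∀ j, k ≤ j → HSat (siftup x k) j := by
      intro j hj
      by_cases hjk : j = k
      · rw [hjk]; exact H
      · by_cases hsubj : subQ k j = true
        · exact HSat_sub H hsubj
        · apply HSat_congr L ?_ (hall j (by omega))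
          intro r hr
          apply U
          rcases Bool.eq_false_or_eq_true (subQ k r) with ht | hf
          · exact absurd (subQ_chain r k j ht hr (by omega)) (by simpa using hsubj)
          · exact hf
    obtain ⟨L2, P2, H2⟩ := ihk (siftup x k) (by omega) hall'
    exact ⟨by rw [L2, L], P2.trans P, H2⟩

lemma heapify_spec (h : List (Int × Int)) :
    (heapify h).Perm h ∧ HSat (heapify h) 0 := by
  have := heapify_fold (h.length / 2) h (by omega) ?_
  · exact ⟨this.2.1, this.2.2⟩
  · intro j hj
    exact HSat_leaf (by omega)

lemma heappush_spec {h : List (Int × Int)} (hv : HSat h 0) (x : Int × Int) :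
    (heappush h x).Perm (x :: h) ∧ HSat (heappush h x) 0 := by
  have hlen : h.length < (h ++ [x]).length := by simp
  have hgv : gv (h ++ [x]) h.length = x := gv_append_last h x
  have hset : (h ++ [x]).set h.length x = h ++ [x] := by
    simp
  unfold heappush siftdown
  rw [hgv]
  obtain ⟨L, P, H, U⟩ :=
    siftdownGo_spec x 0 h.length (h ++ [x]) hlen (subQ_zero _)
      (by
        intro b hb hsb hbs hbl
        rw [hset]
        have hb' : b < h.length := by
          simp at hb; omega
        have hp' : (b - 1) / 2 < h.length := by
          have : (b - 1) / 2 ≤ b := by omega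
          omega
        rw [gv_append_lt hb', gv_append_lt hp']
        exact hv b hb' (subQ_zero b) hbs)
      (by
        intro hne b hb hbc
        exfalso
        have : 1 ≤ h.length := by
          rcases Nat.eq_zero_or_pos h.length with h0 | h0
          · exact absurd (h0 ▸ rfl) hne
          · omega
        simp at hb
        omega)
  rw [hset] at P
  constructor
  · exact P.trans (List.perm_append_singleton x h)
  · exact H

lemma heappop_spec {h : List (Int × Int)} (hne : h ≠ []) (hv : HSat h 0) :
    (heappop h).1 = gv h 0 ∧ (heappop h).2.Perm h.tail ∧ HSat (heappop h).2 0 := by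
  obtain ⟨y, t, rfl⟩ := List.exists_cons_of_ne_nil hne
  rcases List.eq_nil_or_concat t with rfl | ⟨t', z, rfl⟩
  · -- singleton heap
    unfold heappop
    rw [if_pos (by simp)]
    refine ⟨by simp [gv], by simp, ?_⟩
    intro b hb
    simp at hb
  · -- at least two elements
    simp only [List.concat_eq_append] at hv ⊢
    have hdrop : (y :: (t' ++ [z])).dropLast = y :: t' := by
      rw [← List.cons_append, List.dropLast_concat]
    have hlast : (y :: (t' ++ [z])).getLastD ((0 : Int), (0 : Int)) = z := by
      rw [List.getLastD_eq_getLast?, ← List.cons_append, List.getLast?_concat]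
      rfl
    unfold heappop
    rw [hdrop, hlast, if_neg (by simp)]
    have hsetz : (y :: t').set 0 z = z :: t' := rfl
    rw [hsetz]
    have hfullen : (y :: (t' ++ [z])).length = t'.length + 2 := by simp
    have hpre : ∀ b, b < (z :: t').length → subQ 0 b = true → b ≠ 0 → (b - 1) / 2 ≠ 0 →
        pvLtB (gv (z :: t') b) (gv (z :: t') ((b - 1) / 2)) = false := by
      intro b hb hsb hb0 hpb0
      have hb1 : 1 ≤ b := by omega
      have hblen : b < t'.length + 1 := by simpa using hb
      have e1 : gv (z :: t') b = gv (y :: (t' ++ [z])) b := by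
        rw [← hsetz, gv_set_ne hb0, ← hdrop, gv_dropLast (by simp; omega)]
      have e2 : gv (z :: t') ((b - 1) / 2) = gv (y :: (t' ++ [z])) ((b - 1) / 2) := by
        rw [← hsetz, gv_set_ne hpb0, ← hdrop, gv_dropLast (by simp; omega)]
      rw [e1, e2]
      exact hv b (by simp; omega) (subQ_zero b) hb0
    have h0len : 0 < (z :: t').length := by simp
    obtain ⟨L, P, H, U⟩ := siftup_spec (z :: t') 0 h0len hpre
    refine ⟨?_, ?_, H⟩
    · rfl
    · exact P.trans (List.perm_append_singleton z t').symm

-- ---- the table of (time, index) pairs represented by B's times list ----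
def Tb (times : List Int) : List (Int × Int) :=
  (List.range times.length).map (fun i => (gvI times i, (i : Int)))

lemma Tb_getElem {times : List Int} {i : Nat} (hi : i < times.length) :
    (Tb times)[i]'(by simpa [Tb] using hi) = (gvI times i, (i : Int)) := by
  simp [Tb]

lemma gvI_set_self {times : List Int} {r : Nat} (hr : r < times.length) (v : Int) :
    gvI (times.set r v) r = v := by
  simp [gvI, List.getD_eq_getElem?_getD, hr]

lemma gvI_set_ne {times : List Int} {i r : Nat} (hir : i ≠ r) (v : Int) :
    gvI (times.set r v) i = gvI times i := by
  have : r ≠ i := fun hc => hir hc.symm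
  simp [gvI, List.getD_eq_getElem?_getD, List.getElem?_set_ne this]

lemma Tb_set {times : List Int} {r : Nat} (hr : r < times.length) (v : Int) :
    Tb (times.set r v) = (Tb times).set r (v, (r : Int)) := by
  apply List.ext_getElem (by simp [Tb])
  intro i h1 h2
  have hiN : i < times.length := by simpa [Tb] using h1
  rw [List.getElem_set]
  simp only [Tb, List.length_set, List.getElem_map, List.getElem_range]
  by_cases hir : r = i
  · rw [if_pos hir, ← hir, gvI_set_self hr]
  · rw [if_neg hir, gvI_set_ne (fun hc => hir hc.symm)]

-- ---- B's linear scan finds the lexicographic minimum of the table ----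
lemma scanBest_spec (times : List Int) (hne : 1 ≤ times.length) :
    scanBest times (times.length - 1) < times.length ∧
    ∀ i, i < times.length →
      pvLtB (gvI times i, (i : Int))
        (gvI times (scanBest times (times.length - 1)),
          (scanBest times (times.length - 1) : Int)) = false := by
  have aux : ∀ k, k < times.length →
      scanBest times k ≤ k ∧
      (∀ i, i < scanBest times k → gvI times (scanBest times k) < gvI times i) ∧
      (∀ i, i ≤ k → gvI times (scanBest times k) ≤ gvI times i) := by
    intro k
    induction k with
    | zero =>
      intro _
      have h0 : scanBest times 0 = 0 := by unfold scanBest; simp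
      rw [h0]
      refine ⟨Nat.le_refl 0, by intro i hi; omega, ?_⟩
      intro i hi
      have : i = 0 := by omega
      rw [this]
    | succ k ihk =>
      intro hk1
      obtain ⟨hle, hstrict, hmin⟩ := ihk (by omega)
      have hstep : scanBest times (k + 1) =
          if gvI times (1 + k) < gvI times (scanBest times k) then 1 + k
          else scanBest times k := by
        unfold scanBest
        rw [List.range'_concat, List.foldl_append, List.foldl_cons, List.foldl_nil]
        simp
      rw [hstep]
      split
      next hlt =>
        have h1k : ∀ i, i ≤ k → gvI times (1 + k) < gvI times i := by
          intro i hi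
          exact lt_of_lt_of_le hlt (hmin i hi)
        refine ⟨by omega, ?_, ?_⟩
        · intro i hi
          exact h1k i (by omega)
        · intro i hi
          by_cases hik : i ≤ k
          · exact le_of_lt (h1k i hik)
          · have : i = 1 + k := by omega
            rw [this]
      next hnlt =>
        refine ⟨by omega, hstrict, ?_⟩
        intro i hi
        by_cases hik : i ≤ k
        · exact hmin i hik
        · have : i = 1 + k := by omega
          rw [this]
          omega
  obtain ⟨hle, hstrict, hmin⟩ := aux (times.length - 1) (by omega)
  refine ⟨by omega, ?_⟩
  intro i hi
  set r := scanBest times (times.length - 1) with hrdef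
  by_cases hir : i < r
  · have := hstrict i hir
    simp only [pvLtB, Bool.or_eq_false_iff, Bool.and_eq_false_iff]
    constructor
    · simp; omega
    · left; simp; omega
  · by_cases hie : i = r
    · rw [hie]; exact pvLt_irrefl _
    · have hri : r < i := by omega
      have := hmin i (by omega)
      simp only [pvLtB, Bool.or_eq_false_iff, Bool.and_eq_false_iff]
      constructor
      · simp; omega
      · by_cases heq : gvI times i = gvI times r
        · right; simp; omega
        · left; simp; omega

-- the heap root equals B's scanned minimum
lemma pop_matches {h : List (Int × Int)} {times : List Int} (hp : h.Perm (Tb times))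
    (hv : HSat h 0) (hne : 1 ≤ times.length) :
    gv h 0 = (gvI times (scanBest times (times.length - 1)),
      (scanBest times (times.length - 1) : Int)) := by
  obtain ⟨hrlt, hmin⟩ := scanBest_spec times hne
  have hlen : h.length = times.length := by
    have := hp.length_eq
    simpa [Tb] using this
  have h0 : 0 < h.length := by omega
  have hmem : gv h 0 ∈ h := by
    rw [gv_eq_getElem h0]
    exact List.getElem_mem h0
  have hmemT : gv h 0 ∈ Tb times := hp.mem_iff.mp hmem
  have h1 : pvLtB (gv h 0) (gvI times (scanBest times (times.length - 1)),
      (scanBest times (times.length - 1) : Int)) = false := by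
    simp only [Tb, List.mem_map, List.mem_range] at hmemT
    obtain ⟨i, hiN, hieq⟩ := hmemT
    rw [← hieq]
    exact hmin i hiN
  have hrT : (gvI times (scanBest times (times.length - 1)),
      (scanBest times (times.length - 1) : Int)) ∈ Tb times := by
    simp only [Tb, List.mem_map, List.mem_range]
    exact ⟨scanBest times (times.length - 1), hrlt, rfl⟩
  have h2 : pvLtB (gvI times (scanBest times (times.length - 1)),
      (scanBest times (times.length - 1) : Int)) (gv h 0) = false :=
    root_min_mem hv (hp.mem_iff.mpr hrT)
  exact pvLe_connex h1 h2

-- ---- toList simulation: the Array ports compute exactly the list-level ghosts ----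
lemma gvA_eq (h : Array (Int × Int)) (i : Nat) : gvA h i = gv h.toList i := by
  rw [gvA, gv, Array.getD_eq_getD_getElem?, List.getD_eq_getElem?_getD, Array.getElem?_toList]

lemma gvIA_eq (t : Array Int) (i : Nat) : gvIA t i = gvI t.toList i := by
  rw [gvIA, gvI, Array.getD_eq_getD_getElem?, List.getD_eq_getElem?_getD, Array.getElem?_toList]

lemma siftdownGoA_toList (s : Nat) (x : Int × Int) : ∀ pos (h : Array (Int × Int)),
    (siftdownGoA h s pos x).toList = siftdownGo h.toList s pos x := by
  intro pos
  induction pos using Nat.strong_induction_on with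
  | _ pos ih =>
    intro h
    rw [siftdownGoA, siftdownGo]
    by_cases hgt : s < pos
    · rw [dif_pos hgt, dif_pos hgt, gvA_eq]
      by_cases hx : pvLtB x (gv h.toList ((pos - 1) / 2)) = true
      · rw [if_pos hx, if_pos hx, ih _ (by omega), Array.toList_setIfInBounds]
      · rw [if_neg (by simpa using hx), if_neg (by simpa using hx), Array.toList_setIfInBounds]
    · rw [dif_neg hgt, dif_neg hgt, Array.toList_setIfInBounds]

lemma childSelA_eq (h : Array (Int × Int)) (pos : Nat) :
    childSelA h pos = childSel h.toList pos := by
  unfold childSelA childSel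
  rw [gvA_eq, gvA_eq, Array.length_toList]

lemma siftupGoA_toList : ∀ (k : Nat) (h : Array (Int × Int)) (pos : Nat), h.size - pos = k →
    (siftupGoA h pos).1.toList = (siftupGo h.toList pos).1 ∧
    (siftupGoA h pos).2 = (siftupGo h.toList pos).2 := by
  intro k
  induction k using Nat.strong_induction_on with
  | _ k ih =>
    intro h pos hk
    rw [siftupGoA, siftupGo]
    by_cases hc : 2 * pos + 1 < h.size
    · rw [dif_pos hc, dif_pos (by rw [Array.length_toList]; exact hc)]
      have hcs := childSelA_eq h pos
      rw [hcs, gvA_eq]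
      have hge := childSelA_ge h pos
      rw [hcs] at hge
      have hrec := ih ((h.setIfInBounds pos (gv h.toList (childSel h.toList pos))).size -
          childSel h.toList pos)
        (by simp only [Array.size_setIfInBounds]; omega) _ (childSel h.toList pos) rfl
      constructor
      · rw [hrec.1, Array.toList_setIfInBounds]
      · rw [hrec.2, Array.toList_setIfInBounds]
    · rw [dif_neg hc, dif_neg (by rw [Array.length_toList]; exact hc)]
      exact ⟨rfl, rfl⟩

lemma siftupA_toList (h : Array (Int × Int)) (pos : Nat) :
    (siftupA h pos).toList = siftup h.toList pos := by
  obtain ⟨h1, h2⟩ := siftupGoA_toList (h.size - pos) h pos rfl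
  simp only [siftupA, siftup, siftdownA, siftdown]
  rw [siftdownGoA_toList, gvA_eq, gvA_eq, Array.toList_setIfInBounds, h1, h2]

lemma heappushA_toList (h : Array (Int × Int)) (item : Int × Int) :
    (heappushA h item).toList = heappush h.toList item := by
  simp only [heappushA, heappush, siftdownA, siftdown]
  rw [siftdownGoA_toList, gvA_eq, Array.toList_push, Array.length_toList]

lemma heappopA_toList (h : Array (Int × Int)) :
    (heappopA h).1 = (heappop h.toList).1 ∧ (heappopA h).2.toList = (heappop h.toList).2 := by
  have hlastD : ∀ (l : List (Int × Int)) (d : Int × Int), l.getLastD d = l.getD (l.length - 1) d := by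
    intro l d
    cases l with
    | nil => rfl
    | cons x t =>
      rw [List.getLastD_eq_getLast?, List.getLast?_eq_getElem?, List.getD_eq_getElem?_getD]
  have hlast : gvA h (h.size - 1) = h.toList.getLastD ((0 : Int), (0 : Int)) := by
    rw [gvA_eq, hlastD, gv, Array.length_toList]
  have hpopL : h.pop.toList = h.toList.dropLast := Array.toList_pop
  have hemp : h.pop.isEmpty = h.toList.dropLast.isEmpty := by
    rw [← hpopL, Array.isEmpty_toList]
  simp only [heappopA, heappop]
  by_cases he : h.toList.dropLast.isEmpty = true
  · rw [if_pos (by rw [hemp]; exact he), if_pos he, hlast]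
    exact ⟨rfl, hpopL⟩
  · rw [if_neg (by rw [hemp]; exact he), if_neg he]
    refine ⟨?_, ?_⟩
    · rw [gvA_eq, hpopL]
    · rw [siftupA_toList, Array.toList_setIfInBounds, hpopL, hlast]

lemma heapifyA_toList (h : Array (Int × Int)) :
    (heapifyA h).toList = heapify h.toList := by
  have aux : ∀ (l : List Nat) (a : Array (Int × Int)),
      (l.foldl (fun x i => siftupA x i) a).toList = l.foldl (fun x i => siftup x i) a.toList := by
    intro l
    induction l with
    | nil => intro a; rfl
    | cons i t ih =>
      intro a
      rw [List.foldl_cons, List.foldl_cons, ih, siftupA_toList]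
  unfold heapifyA heapify
  rw [aux, Array.length_toList]

lemma scanBestA_eq (t : Array Int) (k : Nat) : scanBestA t k = scanBest t.toList k := by
  unfold scanBestA scanBest
  have hf : (fun (best : Nat) (i : Nat) => if gvIA t i < gvIA t best then i else best) =
      (fun (best : Nat) (i : Nat) => if gvI t.toList i < gvI t.toList best then i else best) := by
    funext best i
    rw [gvIA_eq, gvIA_eq]
  rw [hf]

-- ---- the two main loops, step for step ----
def stepA (st : List (Int × Int) × List (Int × Int)) (job : Int) :
    List (Int × Int) × List (Int × Int) :=
  (st.1 ++ [((heappop st.2).1.2, (heappop st.2).1.1)],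
    heappush (heappop st.2).2 ((heappop st.2).1.1 + job, (heappop st.2).1.2))

def stepB (n : Int) (st : List (Int × Int) × List Int) (job : Int) :
    List (Int × Int) × List Int :=
  (st.1 ++ [((scanBest st.2 (n.toNat - 1) : Int), gvI st.2 (scanBest st.2 (n.toNat - 1)))],
    st.2.set (scanBest st.2 (n.toNat - 1)) (gvI st.2 (scanBest st.2 (n.toNat - 1)) + job))

lemma portA_eq (n m : Int) (data : List Int) : parallel_processing n m data =
    (data.foldl stepA
      ([], heapify ((PySem.List.pyRange 0 n 1).map (fun i => ((0 : Int), i))))).1 := by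
  have aux : ∀ (ds : List Int) (out : List (Int × Int)) (a : Array (Int × Int)),
      (ds.foldl (fun (st : List (Int × Int) × Array (Int × Int)) job =>
        let p := heappopA st.2
        (st.1 ++ [(p.1.2, p.1.1)], heappushA p.2 (p.1.1 + job, p.1.2))) (out, a)).1 =
      (ds.foldl stepA (out, a.toList)).1 := by
    intro ds
    induction ds with
    | nil => intro out a; rfl
    | cons d t ih =>
      intro out a
      rw [List.foldl_cons, List.foldl_cons]
      obtain ⟨hp1, hp2⟩ := heappopA_toList a
      have e1 : (let p := heappopA (out, a).2;
          ((out, a).1 ++ [(p.1.2, p.1.1)], heappushA p.2 (p.1.1 + d, p.1.2))) =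
          (out ++ [((heappop a.toList).1.2, (heappop a.toList).1.1)],
            heappushA (heappopA a).2 ((heappop a.toList).1.1 + d, (heappop a.toList).1.2)) := by
        show ((out, a).1 ++ [((heappopA (out, a).2).1.2, (heappopA (out, a).2).1.1)],
          heappushA (heappopA (out, a).2).2
            ((heappopA (out, a).2).1.1 + d, (heappopA (out, a).2).1.2)) = _
        rw [show (out, a).2 = a from rfl, hp1]
      rw [e1, ih]
      have e2 : (heappushA (heappopA a).2
          ((heappop a.toList).1.1 + d, (heappop a.toList).1.2)).toList =
          heappush (heappop a.toList).2 ((heappop a.toList).1.1 + d, (heappop a.toList).1.2) := by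
        rw [heappushA_toList, hp2]
      rw [e2]
      rfl
  simp only [parallel_processing]
  rw [aux, heapifyA_toList]

lemma portB_eq (n m : Int) (data : List Int) : parallel_processing_alt n m data =
    (data.foldl (stepB n) ([], List.replicate n.toNat 0)).1 := by
  have aux : ∀ (ds : List Int) (out : List (Int × Int)) (t : Array Int),
      (ds.foldl (fun (st : List (Int × Int) × Array Int) job =>
        let best := scanBestA st.2 (n.toNat - 1)
        (st.1 ++ [((best : Int), gvIA st.2 best)],
          st.2.setIfInBounds best (gvIA st.2 best + job))) (out, t)).1 =
      (ds.foldl (stepB n) (out, t.toList)).1 := by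
    intro ds
    induction ds with
    | nil => intro out t; rfl
    | cons d tl ih =>
      intro out t
      rw [List.foldl_cons, List.foldl_cons]
      have e1 : (let best := scanBestA (out, t).2 (n.toNat - 1);
          ((out, t).1 ++ [((best : Int), gvIA (out, t).2 best)],
            (out, t).2.setIfInBounds best (gvIA (out, t).2 best + d))) =
          (out ++ [((scanBest t.toList (n.toNat - 1) : Int),
            gvI t.toList (scanBest t.toList (n.toNat - 1)))],
          t.setIfInBounds (scanBest t.toList (n.toNat - 1))
            (gvI t.toList (scanBest t.toList (n.toNat - 1)) + d)) := by
        show ((out, t).1 ++ [((scanBestA (out, t).2 (n.toNat - 1) : Int),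
            gvIA (out, t).2 (scanBestA (out, t).2 (n.toNat - 1)))],
          (out, t).2.setIfInBounds (scanBestA (out, t).2 (n.toNat - 1))
            (gvIA (out, t).2 (scanBestA (out, t).2 (n.toNat - 1)) + d)) = _
        rw [show (out, t).2 = t from rfl, scanBestA_eq, gvIA_eq]
      rw [e1, ih, Array.toList_setIfInBounds]
      rfl
  simp only [parallel_processing_alt]
  rw [aux, Array.toList_replicate]

lemma loop_eq (n : Int) :
    ∀ (ds : List Int) (out : List (Int × Int)) (h : List (Int × Int)) (times : List Int),
    times.length = n.toNat → 1 ≤ times.length → h.Perm (Tb times) → HSat h 0 →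
    (ds.foldl stepA (out, h)).1 = (ds.foldl (stepB n) (out, times)).1 := by
  intro ds
  induction ds with
  | nil => intro out h times _ _ _ _; rfl
  | cons d ds ih =>
    intro out h times htlen hne1 hp hv
    have hlen : h.length = times.length := by
      have := hp.length_eq
      simpa [Tb] using this
    have hne : h ≠ [] := by
      intro hc
      rw [hc] at hlen
      simp at hlen
      omega
    obtain ⟨hpop1, hpop2, hpopH⟩ := heappop_spec hne hv
    have hmatch := pop_matches hp hv hne1
    set r := scanBest times (times.length - 1) with hrdef
    obtain ⟨hrlt, _⟩ := scanBest_spec times hne1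
    have hnr : scanBest times (n.toNat - 1) = r := by rw [htlen] at hrdef; rw [hrdef]
    -- the new states
    obtain ⟨hpushP, hpushH⟩ := heappush_spec hpopH ((gvI times r + d, (r : Int)))
    have htail : h.tail.Perm ((Tb times).eraseIdx r) := by
      obtain ⟨y, t, rfl⟩ := List.exists_cons_of_ne_nil hne
      have hrT : r < (Tb times).length := by simp [Tb]; omega
      have hTr : (Tb times)[r]'hrT = (gvI times r, (r : Int)) := Tb_getElem (by omega)
      have hTperm : (Tb times).Perm ((gvI times r, (r : Int)) :: (Tb times).eraseIdx r) := by
        have := (List.getElem_cons_eraseIdx_perm hrT).symm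
        rwa [hTr] at this
      have : (y :: t).Perm ((gvI times r, (r : Int)) :: (Tb times).eraseIdx r) :=
        hp.trans hTperm
      have hy : y = (gvI times r, (r : Int)) := by
        have : gv (y :: t) 0 = (gvI times r, (r : Int)) := hmatch
        simpa [gv] using this
      rw [hy] at this
      exact this.cons_inv
    have hTset : Tb (times.set r (gvI times r + d)) =
        (Tb times).set r (gvI times r + d, (r : Int)) := Tb_set (by omega) _
    have hnewperm : (heappush (heappop h).2 (gvI times r + d, (r : Int))).Perm
        (Tb (times.set r (gvI times r + d))) := by
      rw [hTset]
      have h1 : ((Tb times).set r (gvI times r + d, (r : Int))).Perm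
          ((gvI times r + d, (r : Int)) :: (Tb times).eraseIdx r) :=
        List.set_perm_cons_eraseIdx (by simp [Tb]; omega) _
      have h2 : ((gvI times r + d, (r : Int)) :: (heappop h).2).Perm
          ((gvI times r + d, (r : Int)) :: (Tb times).eraseIdx r) :=
        List.Perm.cons _ (hpop2.trans htail)
      exact (hpushP.trans h2).trans h1.symm
    have e1 : stepA (out, h) d =
        (out ++ [((r : Int), gvI times r)],
          heappush (heappop h).2 (gvI times r + d, (r : Int))) := by
      simp only [stepA, hpop1, hmatch]
    have e2 : stepB n (out, times) d =
        (out ++ [((r : Int), gvI times r)], times.set r (gvI times r + d)) := by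
      simp only [stepB, hnr]
    rw [List.foldl_cons, List.foldl_cons, e1, e2]
    exact ih _ _ _ (by simpa using htlen) (by simpa using hne1) hnewperm hpushH


-- ===== VERDICT (by name: the statement is the Claim_ definition above) =====
theorem parallel_processing_spec : Claim_equal_parallel_processing := by
  intro n m data hdom hpre
  unfold Spec_parallel_processing
  rw [portA_eq, portB_eq]
  cases data with
  | nil => rfl
  | cons d ds =>
    have hn : 1 ≤ n := by
      rcases hpre with h | h
      · exact absurd h (by simp)
      · exact h
    have hN : 1 ≤ n.toNat := by omega
    have hL : (PySem.List.pyRange 0 n 1).map (fun i => ((0 : Int), i)) =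
        Tb (List.replicate n.toNat 0) := by
      rw [PySem.List.pyRange_one, List.map_map]
      unfold Tb
      rw [List.length_replicate]
      have hnn : (n - 0).toNat = n.toNat := by omega
      rw [hnn]
      apply List.map_congr_left
      intro i hi
      rw [List.mem_range] at hi
      simp [gvI, hi]
    obtain ⟨hhp, hhH⟩ :=
      heapify_spec ((PySem.List.pyRange 0 n 1).map (fun i => ((0 : Int), i)))
    have hperm : (heapify ((PySem.List.pyRange 0 n 1).map (fun i => ((0 : Int), i)))).Perm
        (Tb (List.replicate n.toNat 0)) := by
      rw [← hL]
      exact hhp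
    have hmain := loop_eq n (d :: ds) []
      (heapify ((PySem.List.pyRange 0 n 1).map (fun i => ((0 : Int), i))))
      (List.replicate n.toNat 0) (by simp) (by simp; omega) hperm hhH
    exact hmain
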